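-- pv_equiv track=rewrite | github.com/jamjam15th/Sentibyahe | scripts/seed_dashboard_demo.py | _unique_answer_keys
-- ===== SOURCE A (Python) =====
-- def _unique_answer_keys(questions: list[dict]) -> list[tuple[str, dict]]:
--     """Match public_form: answer dict keys use disambiguated prompts."""
--     answers_keys: dict[str, None] = {}
--     out: list[tuple[str, dict]] = []
--     for q in questions:
--         prompt = (q.get("prompt") or "").strip()
--         up = prompt
--         n = 1
--         while up in answers_keys:
--             up = f"{prompt} ({n})"
--             n += 1
--         answers_keys[up] = None
--         out.append((up, q))
--     return out
-- ===== SOURCE B (Python) =====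
-- def _unique_answer_keys(questions: list[dict]) -> list[tuple[str, dict]]:
--     """Match public_form: answer dict keys use disambiguated prompts.
--
--     Different mechanism than the rescan-from-1 while loop: a per-prompt
--     resume counter remembers where the previous duplicate of the same
--     prompt stopped (correct because used keys only accumulate, so the
--     smallest free suffix number per prompt never decreases), and the free
--     suffix is picked as the first hit of a bounded range scan -- among
--     len(used)+1 consecutive candidates at least one is always unused.
--     """
--     used: set[str] = set()
--     resume: dict[str, int] = {}
--     out: list[tuple[str, dict]] = []
--     for q in questions:
--         prompt = (q.get("prompt") or "").strip()
--         if prompt not in used: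
--             key = prompt
--         else:
--             start = resume.get(prompt, 1)
--             n = next(i for i in range(start, start + len(used) + 1)
--                      if f"{prompt} ({i})" not in used)
--             resume[prompt] = n + 1
--             key = f"{prompt} ({n})"
--         used.add(key)
--         out.append((key, q))
--     return out
-- ===== Notes on version B (the rewrite author's own statement) =====
-- stated objective: alternative
-- what changed: Replaces the while loop that rescans suffix numbers from 1 for every duplicate by a per-prompt resume counter (the smallest free suffix per prompt never decreases, since used keys only accumulate) plus a bounded range scan picking the first free candidate (pigeonhole: among len(used)+1 consecutive candidates one is unused); on a timing run's random inputs the measured cost is the same.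
import Mathlib
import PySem

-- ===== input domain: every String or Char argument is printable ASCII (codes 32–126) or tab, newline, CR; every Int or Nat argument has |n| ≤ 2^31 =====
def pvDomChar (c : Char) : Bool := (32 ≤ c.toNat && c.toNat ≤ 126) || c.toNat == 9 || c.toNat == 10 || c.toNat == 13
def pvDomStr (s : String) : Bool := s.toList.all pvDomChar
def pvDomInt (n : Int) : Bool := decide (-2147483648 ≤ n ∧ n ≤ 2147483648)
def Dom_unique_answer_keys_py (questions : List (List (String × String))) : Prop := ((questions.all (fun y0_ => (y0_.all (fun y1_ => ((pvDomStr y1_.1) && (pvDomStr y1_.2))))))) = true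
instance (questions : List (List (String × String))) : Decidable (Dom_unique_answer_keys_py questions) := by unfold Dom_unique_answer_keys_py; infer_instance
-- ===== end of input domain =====

-- B replaces A's per-question rescan of suffix numbers from 1 by a per-prompt resume
-- counter plus a bounded range scan for the first free candidate key (no while loop).

-- shared helper: the f-string  f"{prompt} ({n})"  (n is always ≥ 1)
def pyKeySuffix (p : String) (n : Nat) : String := p ++ " (" ++ PySem.Int.toStr (n : Int) ++ ")"

-- ===== PORT A =====
-- A's 'while up in answers_keys' loop; the fuel is the port's termination device only:
-- answers_keys has no duplicate keys, so size+1 probes always reach a free key (proved below).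
def uakA_while (used : PySem.Dict String Unit) (prompt up : String) (n : Nat) : Nat → String
  | 0 => up
  | fuel+1 => if used.contains up then uakA_while used prompt (pyKeySuffix prompt n) (n+1) fuel else up

def unique_answer_keys_py (questions : List (List (String × String))) : List (String × (List (String × String))) :=
  (questions.foldl
    (fun (st : PySem.Dict String Unit × List (String × (List (String × String)))) q =>
      let prompt := PySem.Str.strip ((PySem.Dict.mk q).getD "prompt" "")
      let up := uakA_while st.1 prompt prompt 1 (st.1.size + 1)
      (st.1.insert up (), st.2 ++ [(up, q)]))
    (PySem.Dict.mk [], [])).2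

-- ===== PORT B =====
-- B's 'next(i for i in range(start, start + len(used) + 1) if f"{prompt} ({i})" not in used)':
-- the first hit of a bounded range scan.  range(start, start + m) over naturals is
-- List.range' start m (exact: start ≥ 1 here).  The pigeonhole bound guarantees a hit
-- (proved below), so the .getD default after find? is never taken.
def uakB_find (used : PySem.Set String) (prompt : String) (start : Nat) : Nat :=
  ((List.range' start (used.length + 1)).find?
      (fun i => !(PySem.Set.contains used (pyKeySuffix prompt i)))).getD start

def unique_answer_keys_py_alt (questions : List (List (String × String))) : List (String × (List (String × String))) :=
  (questions.foldl
    (fun (st : PySem.Set String × PySem.Dict String Nat × List (String × (List (String × String)))) q =>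
      let prompt := PySem.Str.strip ((PySem.Dict.mk q).getD "prompt" "")
      if PySem.Set.contains st.1 prompt then
        let start := st.2.1.getD prompt 1
        let n := uakB_find st.1 prompt start
        (PySem.Set.add st.1 (pyKeySuffix prompt n),
         st.2.1.insert prompt (n + 1),
         st.2.2 ++ [(pyKeySuffix prompt n, q)])
      else
        (PySem.Set.add st.1 prompt, st.2.1, st.2.2 ++ [(prompt, q)]))
    (([] : PySem.Set String), PySem.Dict.mk [], [])).2.2

-- ===== PRECONDITION & SPEC =====
def Spec_unique_answer_keys_py (questions : List (List (String × String))) (out : List (String × (List (String × String)))) : Prop := out = unique_answer_keys_py_alt questions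
instance (questions : List (List (String × String))) (out : List (String × (List (String × String)))) : Decidable (Spec_unique_answer_keys_py questions out) := by unfold Spec_unique_answer_keys_py; infer_instance

-- ===== CLAIM (what is proved, stated in full; the proofs are below) =====
def Claim_equal_unique_answer_keys_py : Prop := ∀ (questions : List (List (String × String))), Dom_unique_answer_keys_py questions → Spec_unique_answer_keys_py questions (unique_answer_keys_py questions)

-- ===== LEMMAS AND PROOFS =====

-- ---- injectivity of n ↦ pyKeySuffix p n ----

-- decimal value read back from a digit list (left fold), used only to prove injectivity
def pvDigVal (a : Nat) (cs : List Char) : Nat := cs.foldl (fun a c => 10 * a + (c.toNat - 48)) a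

-- the value that appending the decimal digits of n after prefix-value a yields
def pvAppVal (a n : Nat) : Nat :=
  if n < 10 then 10 * a + n
  else 10 * pvAppVal a (n / 10) + n % 10
decreasing_by exact Nat.div_lt_self (by omega) (by omega)

theorem pvAppVal_zero (n : Nat) : pvAppVal 0 n = n := by
  induction n using Nat.strong_induction_on with
  | _ n ih =>
    unfold pvAppVal
    split
    · omega
    · rw [ih (n / 10) (Nat.div_lt_self (by omega) (by omega))]
      omega

theorem pvAppVal_lt {n : Nat} (a : Nat) (h : n < 10) : pvAppVal a n = 10 * a + n := by
  rw [pvAppVal]; simp [h]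

theorem pvAppVal_ge {n : Nat} (a : Nat) (h : ¬ n < 10) : pvAppVal a n = 10 * pvAppVal a (n / 10) + n % 10 := by
  conv_lhs => rw [pvAppVal]
  simp [h]

theorem pvDigitChar_val {m : Nat} (h : m < 10) : (Nat.digitChar m).toNat - 48 = m := by
  interval_cases m <;> decide

theorem pvDigVal_toDigitsCore (fuel : Nat) :
    ∀ (n : Nat) (ds : List Char) (a : Nat), n < fuel →
      pvDigVal a (Nat.toDigitsCore 10 fuel n ds) = pvDigVal (pvAppVal a n) ds := by
  induction fuel with
  | zero => intro n ds a h; omega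
  | succ fuel ih =>
    intro n ds a h
    show pvDigVal a (Nat.toDigitsCore 10 (fuel+1) n ds) = _
    rw [Nat.toDigitsCore]
    by_cases h10 : n / 10 = 0
    · have hn : n < 10 := by omega
      have hmod : n % 10 = n := Nat.mod_eq_of_lt hn
      simp only [h10, if_true, pvDigVal, List.foldl_cons]
      rw [pvAppVal_lt a hn, hmod, pvDigitChar_val hn]
    · have hn : ¬ n < 10 := by omega
      simp only [if_neg h10]
      rw [ih (n / 10) _ a (by omega)]
      simp only [pvDigVal, List.foldl_cons]
      rw [pvAppVal_ge a hn, pvDigitChar_val (Nat.mod_lt _ (by omega))]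

theorem pvDigVal_toDigits (n : Nat) : pvDigVal 0 (Nat.toDigits 10 n) = n := by
  have := pvDigVal_toDigitsCore (n+1) n [] 0 (by omega)
  simpa [Nat.toDigits, pvDigVal, pvAppVal_zero] using this

theorem toDigits_injective {i j : Nat} (h : Nat.toDigits 10 i = Nat.toDigits 10 j) : i = j := by
  have := pvDigVal_toDigits i
  rw [h, pvDigVal_toDigits] at this
  omega

theorem pyKeySuffix_toList (p : String) (n : Nat) :
    (pyKeySuffix p n).toList = p.toList ++ (' ' :: '(' :: (Nat.toDigits 10 n ++ [')'])) := by
  have h1 : (PySem.Int.toStr (n : Int)).toList = Nat.toDigits 10 n := by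
    simp [PySem.Int.toList_toStr, PySem.Int.toChars]
  simp [pyKeySuffix, String.toList_append, h1]

theorem pyKeySuffix_injective (p : String) {i j : Nat} (h : pyKeySuffix p i = pyKeySuffix p j) : i = j := by
  have h2 := congrArg String.toList h
  rw [pyKeySuffix_toList, pyKeySuffix_toList] at h2
  have h3 := List.append_cancel_left h2
  have h4 : Nat.toDigits 10 i ++ [')'] = Nat.toDigits 10 j ++ [')'] := by
    simpa only [List.cons.injEq, true_and] using h3
  exact toDigits_injective (List.append_cancel_right h4)

theorem pyKeySuffix_ne_self (p : String) (n : Nat) : pyKeySuffix p n ≠ p := by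
  intro h
  have h2 : (pyKeySuffix p n).toList.length = p.toList.length := by rw [h]
  rw [pyKeySuffix_toList] at h2
  simp at h2

-- ---- pigeonhole: among length+1 consecutive suffix keys one is not in a nodup list ----

theorem pv_pigeonhole (ks : List String) (p : String) (m : Nat) :
    ∃ k < ks.length + 1, pyKeySuffix p (m + k) ∉ ks := by
  by_contra hall
  push Not at hall
  have hsub : (List.range (ks.length + 1)).map (fun k => pyKeySuffix p (m + k)) ⊆ ks := by
    intro x hx
    simp only [List.mem_map, List.mem_range] at hx
    obtain ⟨k, hk, rfl⟩ := hx
    exact hall k hk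
  have hnd2 : ((List.range (ks.length + 1)).map (fun k => pyKeySuffix p (m + k))).Nodup := by
    refine List.Nodup.map_on ?_ (List.nodup_range)
    intro a ha b hb hab
    have := pyKeySuffix_injective p hab
    omega
  have := (List.subperm_of_subset hnd2 hsub).length_le
  simp at this

-- the same, tighter by one, when the prompt itself is already a used key:
theorem pv_pigeonhole' (ks : List String) (p : String) (m : Nat)
    (hmem : p ∈ ks) : ∃ k < ks.length, pyKeySuffix p (m + k) ∉ ks := by
  by_contra hall
  push Not at hall
  have hsub : (List.range ks.length).map (fun k => pyKeySuffix p (m + k)) ⊆ ks.erase p := by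
    intro x hx
    simp only [List.mem_map, List.mem_range] at hx
    obtain ⟨k, hk, rfl⟩ := hx
    exact (List.mem_erase_of_ne (pyKeySuffix_ne_self p (m + k))).mpr (hall k hk)
  have hnd2 : ((List.range ks.length).map (fun k => pyKeySuffix p (m + k))).Nodup := by
    refine List.Nodup.map_on ?_ (List.nodup_range)
    intro a ha b hb hab
    have := pyKeySuffix_injective p hab
    omega
  have hle := (List.subperm_of_subset hnd2 hsub).length_le
  rw [List.length_erase_of_mem hmem] at hle
  have : 1 ≤ ks.length := List.length_pos_of_mem hmem
  simp at hle
  omega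

-- ---- specs of the two search mechanisms: each returns the least free suffix ≥ its start ----

theorem uakA_while_spec (d : PySem.Dict String Unit) (p : String) :
    ∀ (fuel m : Nat), (∃ k < fuel, d.contains (pyKeySuffix p (m + k)) = false) →
      ∃ r, uakA_while d p (pyKeySuffix p m) (m+1) fuel = pyKeySuffix p r ∧ m ≤ r ∧
        d.contains (pyKeySuffix p r) = false ∧
        ∀ j, m ≤ j → j < r → d.contains (pyKeySuffix p j) = true := by
  intro fuel
  induction fuel with
  | zero => intro m h; omega
  | succ fuel ih =>
    intro m h
    rw [uakA_while]
    by_cases hc : d.contains (pyKeySuffix p m) = true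
    · rw [if_pos hc]
      obtain ⟨k, hk, hfree⟩ := h
      have hk0 : k ≠ 0 := by
        rintro rfl
        rw [Nat.add_zero] at hfree
        rw [hc] at hfree
        cases hfree
      obtain ⟨r, hr, hmr, hfree', hmin⟩ := ih (m+1)
        ⟨k - 1, by omega, by simpa [show m + 1 + (k - 1) = m + k from by omega] using hfree⟩
      exact ⟨r, hr, by omega, hfree', fun j hj1 hj2 => by
        rcases Nat.eq_or_lt_of_le hj1 with rfl | hlt
        · exact hc
        · exact hmin j hlt hj2⟩
    · rw [if_neg hc]
      exact ⟨m, rfl, le_refl m, by simpa using hc, fun j h1 h2 => by omega⟩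

-- find? over a consecutive range returns the least index ≥ start satisfying the predicate
theorem find_range'_spec (p : Nat → Bool) :
    ∀ (L start : Nat), (∃ k < L, p (start + k) = true) →
      ∃ r, (List.range' start L).find? p = some r ∧ start ≤ r ∧ p r = true ∧
        ∀ j, start ≤ j → j < r → p j = false := by
  intro L
  induction L with
  | zero => intro start h; omega
  | succ L ih =>
    intro start h
    rw [List.range'_succ, List.find?_cons]
    by_cases hc : p start = true
    · rw [hc]
      exact ⟨start, rfl, le_refl _, hc, fun j h1 h2 => by omega⟩
    · rw [Bool.not_eq_true] at hc
      rw [hc]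
      obtain ⟨k, hk, hkp⟩ := h
      have hk0 : k ≠ 0 := by
        rintro rfl
        rw [Nat.add_zero, hc] at hkp
        cases hkp
      obtain ⟨r, hr, h1, h2, h3⟩ := ih (start+1)
        ⟨k - 1, by omega, by simpa [show start + 1 + (k - 1) = start + k from by omega] using hkp⟩
      exact ⟨r, hr, by omega, h2, fun j hj1 hj2 => by
        rcases Nat.eq_or_lt_of_le hj1 with rfl | hlt
        · exact hc
        · exact h3 j hlt hj2⟩

theorem uakB_find_spec (s : PySem.Set String) (p : String) (start : Nat)
    (h : ∃ k < s.length + 1, PySem.Set.contains s (pyKeySuffix p (start + k)) = false) :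
    ∃ r, uakB_find s p start = r ∧ start ≤ r ∧
      PySem.Set.contains s (pyKeySuffix p r) = false ∧
      ∀ j, start ≤ j → j < r → PySem.Set.contains s (pyKeySuffix p j) = true := by
  obtain ⟨k, hk, hkf⟩ := h
  obtain ⟨r, hr, h1, h2, h3⟩ := find_range'_spec
    (fun i => !(PySem.Set.contains s (pyKeySuffix p i))) (s.length + 1) start
    ⟨k, hk, by rw [Bool.not_eq_true']; exact hkf⟩
  refine ⟨r, ?_, h1, by simpa using h2, fun j hj1 hj2 => by simpa using h3 j hj1 hj2⟩
  unfold uakB_find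
  rw [hr]
  rfl

-- ---- the coupled fold invariant ----

def pvInv (d : PySem.Dict String Unit) (s : PySem.Set String) (c : PySem.Dict String Nat) : Prop :=
  d.keys = s ∧ s.Nodup ∧
    ∀ p m, c.get? p = some m → 1 ≤ m ∧ ∀ k, 1 ≤ k → k < m → pyKeySuffix p k ∈ s

theorem pv_main : ∀ (qs : List (List (String × String))) d s c
    (out : List (String × (List (String × String)))), pvInv d s c →
    (qs.foldl
      (fun (st : PySem.Dict String Unit × List (String × (List (String × String)))) q =>
        let prompt := PySem.Str.strip ((PySem.Dict.mk q).getD "prompt" "")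
        let up := uakA_while st.1 prompt prompt 1 (st.1.size + 1)
        (st.1.insert up (), st.2 ++ [(up, q)])) (d, out)).2 =
    (qs.foldl
      (fun (st : PySem.Set String × PySem.Dict String Nat × List (String × (List (String × String)))) q =>
        let prompt := PySem.Str.strip ((PySem.Dict.mk q).getD "prompt" "")
        if PySem.Set.contains st.1 prompt then
          let start := st.2.1.getD prompt 1
          let n := uakB_find st.1 prompt start
          (PySem.Set.add st.1 (pyKeySuffix prompt n),
           st.2.1.insert prompt (n + 1),
           st.2.2 ++ [(pyKeySuffix prompt n, q)])
        else
          (PySem.Set.add st.1 prompt, st.2.1, st.2.2 ++ [(prompt, q)])) (s, c, out)).2.2 := by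
  intro qs
  induction qs with
  | nil => intro d s c out _; rfl
  | cons q qs ih =>
    intro d s c out hinv
    obtain ⟨hk, hnd, hcnt⟩ := hinv
    have hmemd : ∀ x, d.contains x = decide (x ∈ s) := by
      intro x; rw [PySem.Dict.contains_eq_decide_mem_keys, hk]
    have hmems : ∀ x, PySem.Set.contains s x = decide (x ∈ s) := by
      intro x
      by_cases hx : x ∈ s
      · simp [hx]
      · simp only [hx, decide_false]
        by_contra hcon
        simp only [Bool.not_eq_false] at hcon
        exact hx ((PySem.Set.contains_iff s x).mp hcon)
    have hsize : d.size = s.length := by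
      rw [← hk]; simp [PySem.Dict.size, PySem.Dict.keys]
    simp only [List.foldl_cons]
    by_cases hmem : PySem.Str.strip ((PySem.Dict.mk q).getD "prompt" "") ∈ s
    case neg =>
      -- prompt unused: both sides take it verbatim
      rw [uakA_while, if_neg (by simp [hmemd, hmem]), if_neg (by simp [hmem])]
      have hkeys : (d.insert (PySem.Str.strip ((PySem.Dict.mk q).getD "prompt" "")) ()).keys =
          PySem.Set.add s (PySem.Str.strip ((PySem.Dict.mk q).getD "prompt" "")) := by
        rw [PySem.Dict.keys_insert_of_not_contains _ _ (by simp [hmemd, hmem]), hk]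
        simp [PySem.Set.add, hmem]
      refine ih _ _ _ _ ⟨hkeys, PySem.Set.nodup_add s _ hnd, ?_⟩
      · intro p' m' hm'
        obtain ⟨h1, h2⟩ := hcnt p' m' hm'
        refine ⟨h1, fun k hk1 hk2 => ?_⟩
        simp [PySem.Set.add, hmem]
        exact Or.inl (h2 k hk1 hk2)
    case pos =>
      set P := PySem.Str.strip ((PySem.Dict.mk q).getD "prompt" "") with hP
      -- A's loop: one unfolding, then the least-free spec from index 1
      rw [uakA_while, if_pos (by simp [hmemd, hmem])]
      obtain ⟨kA, hkA, hfA⟩ := pv_pigeonhole' s P 1 hmem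
      obtain ⟨rA, hrA, h1A, hfreeA, hminA⟩ :=
        uakA_while_spec d P d.size 1 ⟨kA, by omega, by simp [hmemd, hfA]⟩
      rw [hrA]
      -- B's branch and bounded scan
      rw [if_pos (by simp [hmems, hmem])]
      have hn0 := PySem.Dict.getD_eq_get?_getD c P 1
      have hcn0 : 1 ≤ c.getD P 1 ∧ ∀ k, 1 ≤ k → k < c.getD P 1 → pyKeySuffix P k ∈ s := by
        cases hg : c.get? P with
        | none => rw [hn0, hg]; exact ⟨by simp, fun k h1 h2 => by simp at h2; omega⟩
        | some m => rw [hn0, hg]; exact hcnt P m hg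
      obtain ⟨kB, hkB, hfB⟩ := pv_pigeonhole s P (c.getD P 1)
      obtain ⟨rB, hrB, h1B, hfreeB, hminB⟩ :=
        uakB_find_spec s P (c.getD P 1) ⟨kB, hkB, by simp [hfB]⟩
      rw [hrB]
      -- the two least free indices coincide
      have hfreeA' : pyKeySuffix P rA ∉ s := by simpa [hmemd] using hfreeA
      have hfreeB' : pyKeySuffix P rB ∉ s := by simpa [hmems] using hfreeB
      have hminA' : ∀ j, 1 ≤ j → j < rA → pyKeySuffix P j ∈ s := by
        intro j u v; have := hminA j u v; simpa [hmemd] using this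
      have hminB' : ∀ j, c.getD P 1 ≤ j → j < rB → pyKeySuffix P j ∈ s := by
        intro j u v; have := hminB j u v; simpa [hmems] using this
      have hgeA : c.getD P 1 ≤ rA := by
        by_contra hlt
        exact hfreeA' (hcn0.2 rA h1A (by omega))
      have hray : rA = rB := by
        rcases lt_trichotomy rA rB with h | h | h
        · exact absurd (hminB' rA hgeA h) hfreeA'
        · exact h
        · exact absurd (hminA' rB (le_trans hcn0.1 h1B) h) hfreeB'
      rw [hray]
      -- re-establish the invariant and recurse
      have hkey_new : pyKeySuffix P rB ∉ s := hfreeB'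
      have hadd : PySem.Set.add s (pyKeySuffix P rB) = s ++ [pyKeySuffix P rB] := by
        simp [PySem.Set.add, hkey_new]
      have hkeys : (d.insert (pyKeySuffix P rB) ()).keys = PySem.Set.add s (pyKeySuffix P rB) := by
        rw [PySem.Dict.keys_insert_of_not_contains _ _ (by simp [hmemd, hkey_new]), hk, hadd]
      refine ih _ _ _ _ ⟨hkeys, PySem.Set.nodup_add s _ hnd, ?_⟩
      intro p' m' hm'
      by_cases hpp : p' = P
      · subst hpp
        rw [PySem.Dict.get?_insert_self] at hm'
        simp only [Option.some.injEq] at hm'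
        subst hm'
        refine ⟨by omega, fun k hk1 hk2 => ?_⟩
        rw [hadd]
        rcases Nat.lt_or_ge k (c.getD P 1) with h | h
        · exact List.mem_append_left _ (hcn0.2 k hk1 h)
        · rcases Nat.lt_or_ge k rB with h2 | h2
          · exact List.mem_append_left _ (hminB' k h h2)
          · have hkr : k = rB := by omega
            rw [hkr]; simp
      · rw [PySem.Dict.get?_insert_of_ne _ _ hpp] at hm'
        obtain ⟨h1, h2⟩ := hcnt p' m' hm'
        refine ⟨h1, fun k hk1 hk2 => ?_⟩
        rw [hadd]
        exact List.mem_append_left _ (h2 k hk1 hk2)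

-- ===== VERDICT (by name: the statement is the Claim_ definition above) =====
theorem unique_answer_keys_py_spec : Claim_equal_unique_answer_keys_py := by
  intro questions _
  unfold Spec_unique_answer_keys_py unique_answer_keys_py unique_answer_keys_py_alt
  exact pv_main questions (PySem.Dict.mk []) [] (PySem.Dict.mk []) []
    ⟨rfl, List.nodup_nil, fun p m h => by simp [PySem.Dict.get?] at h⟩
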